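-- pv_equiv track=rewrite | github.com/tltbti/Technokad_Parser_new | main.py | change_string
-- ===== SOURCE A (Python) =====
-- def change_string(my_str):
--     if my_str.find(',') > 0:
--         edit_my_str = my_str.split(',')
--     else:
--         edit_my_str = my_str.split(';')
--     temp_list = []
--     for index, item in enumerate(edit_my_str):
--         if index == 4:
--             clear_symbol = item.split('/').pop(0)
--             temp_list.append(f'[{clear_symbol}]')
--         else:
--             temp_list.append(item)
--     return ';'.join(temp_list)
-- ===== SOURCE B (Python) =====
-- def change_string(my_str):
--     # Single left-to-right character scan: no split, no field list.
--     # Separators are rewritten to ';' while counting fields; entering field 4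
--     # emits '[', a '/' inside field 4 switches to skip mode, and leaving
--     # field 4 (next separator or end of string) emits ']'.
--     sep = ',' if my_str.find(',') > 0 else ';'
--     out = []
--     field = 0
--     skip = False
--     for ch in my_str:
--         if ch == sep:
--             if field == 4:
--                 out.append(']')
--                 skip = False
--             field += 1
--             out.append(';')
--             if field == 4:
--                 out.append('[')
--         elif field == 4 and ch == '/':
--             skip = True
--         elif not skip:
--             out.append(ch)
--     if field == 4:
--         out.append(']')
--     return ''.join(out)
-- ===== Notes on version B (the rewrite author's own statement) =====
-- stated objective: alternative
-- what changed: Replaces A's split-into-fields / enumerate-and-rebuild-list / join pipeline by a single left-to-right character scan with a field counter and a skip flag: it rewrites each separator to the output delimiter, emits an opening bracket on entering the fifth field, stops copying at a slash inside that field, and emits the closing bracket on leaving it.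
import Mathlib
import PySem

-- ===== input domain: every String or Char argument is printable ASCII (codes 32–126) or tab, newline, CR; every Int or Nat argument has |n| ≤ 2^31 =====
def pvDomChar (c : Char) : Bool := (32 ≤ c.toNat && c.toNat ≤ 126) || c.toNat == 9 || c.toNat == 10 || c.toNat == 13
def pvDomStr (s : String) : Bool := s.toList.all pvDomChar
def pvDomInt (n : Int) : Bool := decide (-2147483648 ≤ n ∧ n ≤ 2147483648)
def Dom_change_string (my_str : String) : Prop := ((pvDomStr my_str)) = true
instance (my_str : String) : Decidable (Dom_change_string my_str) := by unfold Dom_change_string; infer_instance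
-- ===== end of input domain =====

-- B replaces A's split / enumerate-and-rebuild / join pipeline by a single
-- left-to-right character scan with a field counter (objective: alternative).

-- ===== PORT A =====
-- split? never gets an empty separator here, so .getD [] is unreachable;
-- likewise .pop(0) acts on a split result, which is never empty, so .getD "" is unreachable.
def change_string (my_str : String) : String :=
  let edit_my_str :=
    if PySem.Str.find my_str "," > 0 then (PySem.Str.split? my_str ",").getD []
    else (PySem.Str.split? my_str ";").getD []
  let temp_list := (PySem.List.enumerate edit_my_str).foldl
    (fun acc p =>
      if p.1 == 4 then
        acc ++ ["[" ++ ((PySem.List.pop? ((PySem.Str.split? p.2 "/").getD []) 0).map Prod.fst).getD "" ++ "]"]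
      else acc ++ [p.2]) []
  PySem.Str.join ";" temp_list

-- ===== PORT B =====
-- one step of Source B's loop body, on state (out, field, skip); out is the list of
-- emitted characters (Source B appends only single-character strings, so ''.join(out)
-- is exactly String.ofList of this list)
def pvBStep (sep : Char) (st : List Char × Int × Bool) (ch : Char) : List Char × Int × Bool :=
  if ch == sep then
    let st1 := if st.2.1 == 4 then (st.1 ++ [']'], st.2.1, false) else st
    let f := st1.2.1 + 1
    let out := st1.1 ++ [';']
    (if f == 4 then out ++ ['['] else out, f, st1.2.2)
  else if st.2.1 == 4 && ch == '/' then (st.1, st.2.1, true)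
  else if !st.2.2 then (st.1 ++ [ch], st.2.1, st.2.2)
  else st

def change_string_alt (my_str : String) : String :=
  let sep : Char := if PySem.Str.find my_str "," > 0 then ',' else ';'
  let st := my_str.toList.foldl (pvBStep sep) ([], 0, false)
  String.ofList (if st.2.1 == 4 then st.1 ++ [']'] else st.1)

-- ===== PRECONDITION & SPEC =====
def Spec_change_string (my_str : String) (out : String) : Prop := out = change_string_alt my_str
instance (my_str : String) (out : String) : Decidable (Spec_change_string my_str out) := by unfold Spec_change_string; infer_instance

-- ===== CLAIM (what is proved, stated in full; the proofs are below) =====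
def Claim_equal_change_string : Prop := ∀ (my_str : String), Dom_change_string my_str → Spec_change_string my_str (change_string my_str)

-- ===== LEMMAS AND PROOFS =====

-- ---- common proof-side vocabulary (List Char level) ----

-- structural recursion computing Python's split on a one-character separator
def pvSplitRec (d : Char) : List Char → List (List Char)
  | [] => [[]]
  | c :: cs =>
    if c = d then [] :: pvSplitRec d cs
    else (c :: (pvSplitRec d cs).head?.getD []) :: (pvSplitRec d cs).tail

-- ';'.join at the char level
def pvJoin : List (List Char) → List Char
  | [] => []
  | [p] => p
  | p :: q :: r => p ++ ';' :: pvJoin (q :: r)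

-- every separator replaced by ';'
def pvMapRepl (d : Char) (cs : List Char) : List Char :=
  cs.map (fun c => if c = d then ';' else c)

-- '[' ++ part before the first '/' ++ ']'
def pvBrack (p : List Char) : List Char := ('[' :: (p.takeWhile (· ≠ '/'))) ++ [']']

def pvBracketAt (k : Nat) (ps : List (List Char)) : List (List Char) :=
  if k < ps.length then ps.set k (pvBrack (ps[k]?.getD [])) else ps

-- B's behaviour inside field 4 after a '/' was seen (skip mode)
def pvSkip (d : Char) : List Char → List Char
  | [] => [']']
  | c :: cs => if c = d then ']' :: ';' :: pvMapRepl d cs else pvSkip d cs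

-- B's behaviour inside field 4 before any '/'
def pvSl (d : Char) : List Char → List Char
  | [] => [']']
  | c :: cs =>
    if c = d then ']' :: ';' :: pvMapRepl d cs
    else if c = '/' then pvSkip d cs
    else c :: pvSl d cs

-- B's behaviour with k more separators to go until field 4
def pvSpecB (d : Char) : Nat → List Char → List Char
  | 0, cs => '[' :: pvSl d cs
  | _+1, [] => []
  | k+1, c :: cs => if c = d then ';' :: pvSpecB d k cs else c :: pvSpecB d (k+1) cs

-- ---- basic facts about pvSplitRec ----

theorem pvSplitRec_ne_nil (d : Char) (cs : List Char) : pvSplitRec d cs ≠ [] := by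
  cases cs with
  | nil => simp [pvSplitRec]
  | cons c cs => unfold pvSplitRec; split <;> simp

theorem pvSplitRec_eq (d : Char) (cs : List Char) :
    pvSplitRec d cs = (pvSplitRec d cs).head?.getD [] :: (pvSplitRec d cs).tail := by
  cases h : pvSplitRec d cs with
  | nil => exact absurd h (pvSplitRec_ne_nil d cs)
  | cons p ps => simp

theorem pvSplitRec_cons_sep (d : Char) (c : Char) (cs : List Char) (h : c = d) :
    pvSplitRec d (c :: cs) = [] :: pvSplitRec d cs := by
  simp [pvSplitRec, h]

theorem pvSplitRec_cons_ne (d : Char) (c : Char) (cs : List Char) (h : ¬ c = d) :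
    pvSplitRec d (c :: cs) =
      (c :: (pvSplitRec d cs).head?.getD []) :: (pvSplitRec d cs).tail := by
  simp [pvSplitRec, h]

theorem pvSplitRec_headD (d : Char) (cs : List Char) :
    (pvSplitRec d cs).head?.getD [] = cs.takeWhile (· ≠ d) := by
  induction cs with
  | nil => simp [pvSplitRec]
  | cons c cs ih =>
    by_cases h : c = d
    · rw [pvSplitRec_cons_sep d c cs h]
      simp [h]
    · rw [pvSplitRec_cons_ne d c cs h, List.takeWhile_cons_of_pos (by simp [h])]
      simp [ih]

-- the PySem split equals the structural recursion
theorem pv_go_spec (d : Char) :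
    ∀ (fuel : Nat) (l cur : List Char) (acc : List (List Char)), l.length ≤ fuel →
    PySem.Chars.splitOn.go [d] fuel l cur acc =
      acc.reverse ++ (cur.reverse ++ (pvSplitRec d l).head?.getD []) :: (pvSplitRec d l).tail := by
  intro fuel
  induction fuel with
  | zero =>
    intro l cur acc hl
    have : l = [] := by cases l <;> simp_all
    subst this
    simp [PySem.Chars.splitOn.go, pvSplitRec]
  | succ fuel ih =>
    intro l cur acc hl
    cases l with
    | nil => simp [PySem.Chars.splitOn.go, pvSplitRec]
    | cons c rest =>
      by_cases h : c = d
      · have hpre : [d].isPrefixOf (c :: rest) = true := by simp [List.isPrefixOf, h]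
        simp only [PySem.Chars.splitOn.go, hpre, if_true, List.length_cons, List.length_nil,
          Nat.zero_add, List.drop_one, List.tail_cons]
        rw [ih rest [] (cur.reverse :: acc) (by simp at hl; omega)]
        rw [pvSplitRec_cons_sep d c rest h]
        simp [← pvSplitRec_eq d rest]
      · have hpre : [d].isPrefixOf (c :: rest) = false := by
          simp [List.isPrefixOf]; exact fun hdc => h hdc.symm
        simp only [PySem.Chars.splitOn.go, hpre, Bool.false_eq_true, if_false]
        rw [ih rest (c :: cur) acc (by simp at hl; omega)]
        rw [pvSplitRec_cons_ne d c rest h]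
        simp

theorem pv_splitOn_eq (d : Char) (cs : List Char) :
    PySem.Chars.splitOn cs [d] = pvSplitRec d cs := by
  unfold PySem.Chars.splitOn
  rw [pv_go_spec d (cs.length + 1) cs [] [] (by omega)]
  simpa using (pvSplitRec_eq d cs).symm

-- ---- pvJoin glue ----

theorem pvJoin_eq_join (ps : List (List Char)) : PySem.Chars.join [';'] ps = pvJoin ps := by
  induction ps with
  | nil => simp [PySem.Chars.join, pvJoin, List.intercalate]
  | cons p ps ih =>
    cases ps with
    | nil => simp [PySem.Chars.join, pvJoin, List.intercalate, List.intersperse]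
    | cons q r =>
      simp only [PySem.Chars.join, List.intercalate] at ih ⊢
      rw [List.intersperse_cons₂]
      simp only [List.flatten_cons, ih]
      simp [pvJoin]

theorem pvJoin_cons_cons (c : Char) (h : List Char) (r : List (List Char)) :
    pvJoin ((c :: h) :: r) = c :: pvJoin (h :: r) := by
  cases r <;> simp [pvJoin]

theorem pvJoin_append_cons (a b : List Char) (r : List (List Char)) :
    pvJoin ((a ++ b) :: r) = a ++ pvJoin (b :: r) := by
  cases r <;> simp [pvJoin]

theorem pvJoin_nil_cons (r : List (List Char)) (hr : r ≠ []) :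
    pvJoin ([] :: r) = ';' :: pvJoin r := by
  cases r with
  | nil => simp at hr
  | cons q t => simp [pvJoin]

def pvTailJoin (t : List (List Char)) : List Char :=
  if t = [] then [] else ';' :: pvJoin t

theorem pvJoin_nil_eq_tailJoin (t : List (List Char)) :
    pvJoin ([] :: t) = pvTailJoin t := by
  cases t <;> simp [pvJoin, pvTailJoin]

-- ';'-joining the raw pieces is just replacing separators
theorem pv_join_splitRec (d : Char) (cs : List Char) :
    pvJoin (pvSplitRec d cs) = pvMapRepl d cs := by
  induction cs with
  | nil => simp [pvSplitRec, pvJoin, pvMapRepl]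
  | cons c cs ih =>
    by_cases h : c = d
    · rw [pvSplitRec_cons_sep d c cs h,
        pvJoin_nil_cons _ (pvSplitRec_ne_nil d cs), ih]
      simp [pvMapRepl, h]
    · rw [pvSplitRec_cons_ne d c cs h, pvJoin_cons_cons, ← pvSplitRec_eq d cs, ih]
      simp [pvMapRepl, h]

-- ---- B's field-4 functions, read off the split pieces ----

theorem pv_skip_spec (d : Char) (cs : List Char) :
    pvSkip d cs = ']' :: pvTailJoin (pvSplitRec d cs).tail := by
  induction cs with
  | nil => simp [pvSkip, pvSplitRec, pvTailJoin]
  | cons c cs ih =>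
    by_cases h : c = d
    · rw [show pvSkip d (c :: cs) = ']' :: ';' :: pvMapRepl d cs from by simp [pvSkip, h],
        pvSplitRec_cons_sep d c cs h]
      simp [pvTailJoin, pvSplitRec_ne_nil d cs, pv_join_splitRec]
    · rw [show pvSkip d (c :: cs) = pvSkip d cs from by simp [pvSkip, h],
        pvSplitRec_cons_ne d c cs h]
      simp [ih]

theorem pv_sl_spec (d : Char) (cs : List Char) :
    ((pvSplitRec d cs).head?.getD []).takeWhile (· ≠ '/') ++ ']' :: pvTailJoin (pvSplitRec d cs).tail
      = pvSl d cs := by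
  induction cs with
  | nil => simp [pvSplitRec, pvSl, pvTailJoin]
  | cons c cs ih =>
    by_cases h : c = d
    · rw [pvSplitRec_cons_sep d c cs h,
        show pvSl d (c :: cs) = ']' :: ';' :: pvMapRepl d cs from by simp [pvSl, h]]
      simp [pvTailJoin, pvSplitRec_ne_nil d cs, pv_join_splitRec]
    · by_cases hs : c = '/'
      · have hd : ¬ ('/' : Char) = d := hs ▸ h
        rw [pvSplitRec_cons_ne d c cs h, hs,
          show pvSl d ('/' :: cs) = pvSkip d cs from by simp [pvSl, hd]]
        rw [pv_skip_spec d cs]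
        simp [List.takeWhile_cons_of_neg]
      · rw [pvSplitRec_cons_ne d c cs h,
          show pvSl d (c :: cs) = c :: pvSl d cs from by simp [pvSl, h, hs]]
        simp only [List.head?_cons, Option.getD_some, List.tail_cons]
        rw [List.takeWhile_cons_of_pos (by simp [hs])]
        simpa using ih

-- ---- bracketing field 4 of the pieces = B's char-level behaviour ----

theorem pvBracketAt_succ_cons (k : Nat) (x : List Char) (t : List (List Char)) :
    pvBracketAt (k + 1) (x :: t) = x :: pvBracketAt k t := by
  unfold pvBracketAt
  by_cases h : k < t.length
  · rw [if_pos (by simpa using Nat.succ_lt_succ h), if_pos h]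
    simp [List.set]
  · rw [if_neg (by simpa using fun hh => h (Nat.lt_of_succ_lt_succ hh)), if_neg h]

theorem pvBracketAt_ne_nil (k : Nat) (ps : List (List Char)) (h : ps ≠ []) :
    pvBracketAt k ps ≠ [] := by
  unfold pvBracketAt; split <;> simp [h]

theorem pv_bracket_spec (d : Char) :
    ∀ (k : Nat) (cs : List Char),
      pvJoin (pvBracketAt k (pvSplitRec d cs)) = pvSpecB d k cs := by
  intro k
  induction k with
  | zero =>
    intro cs
    have h0 : pvBracketAt 0 (pvSplitRec d cs)
        = pvBrack ((pvSplitRec d cs).head?.getD []) :: (pvSplitRec d cs).tail := by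
      rw [pvSplitRec_eq d cs]
      simp [pvBracketAt]
    rw [h0]
    unfold pvBrack
    rw [pvJoin_append_cons,
      show ([']'] : List Char) = ']' :: [] from rfl,
      pvJoin_cons_cons, pvJoin_nil_eq_tailJoin,
      show pvSpecB d 0 cs = '[' :: pvSl d cs from by simp [pvSpecB],
      ← pv_sl_spec d cs]
    simp
  | succ k ihk =>
    intro cs
    induction cs with
    | nil => simp [pvSplitRec, pvBracketAt, pvJoin, pvSpecB]
    | cons c cs ihcs =>
      by_cases h : c = d
      · rw [pvSplitRec_cons_sep d c cs h, pvBracketAt_succ_cons,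
          pvJoin_nil_cons _ (pvBracketAt_ne_nil _ _ (pvSplitRec_ne_nil d cs)),
          ihk, show pvSpecB d (k+1) (c :: cs) = ';' :: pvSpecB d k cs from by simp [pvSpecB, h]]
      · rw [pvSplitRec_cons_ne d c cs h, pvBracketAt_succ_cons, pvJoin_cons_cons,
          ← pvBracketAt_succ_cons, ← pvSplitRec_eq d cs, ihcs,
          show pvSpecB d (k+1) (c :: cs) = c :: pvSpecB d (k+1) cs from by simp [pvSpecB, h]]

-- ---- A-side reduction ----

-- first element of a list via pop(0) = via [0]
theorem pv_head_eq (xs : List String) :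
    ((PySem.List.pop? xs 0).map Prod.fst).getD "" = (PySem.List.pyGet? xs 0).getD "" := by
  cases xs <;> simp [PySem.List.pop?, PySem.List.pyGet?, PySem.List.pyIdx?]

-- past index 4 the fold appends every element unchanged
theorem pv_tail_id (g : String → String) (rest : List String) :
    ∀ (acc : List String) (s : Int), 5 ≤ s →
    (PySem.List.enumerate rest s).foldl
      (fun acc p => if p.1 == 4 then acc ++ [g p.2] else acc ++ [p.2]) acc = acc ++ rest := by
  induction rest with
  | nil => intro acc s _; simp [PySem.List.enumerate]
  | cons r rs ih =>
    intro acc s hs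
    rw [PySem.List.enumerate_cons]
    have h4 : (s == 4) = false := by simp; omega
    simp only [List.foldl_cons, h4, Bool.false_eq_true, if_false]
    rw [ih (acc ++ [r]) (s + 1) (by omega)]
    simp

-- A's fold over enumerate = a guarded set at index 4
theorem pv_loop_eq (g : String → String) (xs : List String) :
    (PySem.List.enumerate xs).foldl
      (fun acc p => if p.1 == 4 then acc ++ [g p.2] else acc ++ [p.2]) [] =
    if 4 < xs.length then xs.set 4 (g ((PySem.List.pyGet? xs 4).getD "")) else xs := by
  match xs with
  | [] => simp [PySem.List.enumerate]
  | [a] => simp [PySem.List.enumerate]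
  | [a,b] => simp [PySem.List.enumerate]
  | [a,b,c] => simp [PySem.List.enumerate]
  | [a,b,c,d] => simp [PySem.List.enumerate]
  | a :: b :: c :: d :: e :: rest =>
    simp only [PySem.List.enumerate_cons, List.foldl_cons, Int.reduceAdd, Int.reduceBEq,
      Bool.false_eq_true, if_false, if_true, List.nil_append]
    rw [pv_tail_id g rest _ 5 (by norm_num)]
    have : PySem.List.pyGet? (a :: b :: c :: d :: e :: rest) 4 = some e := by
      have := PySem.List.pyGet?_natCast (a :: b :: c :: d :: e :: rest) 4
      norm_num at this
      simpa using this
    simp [this, List.set]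

-- A, at the char level: with separator character d,
-- A(s) = join of pvSplitRec with field 4 bracketed
theorem pv_A_char (d : Char) (sepStr : String) (hsep : sepStr.toList = [d]) (s : String) :
    PySem.Str.join ";"
      ((PySem.List.enumerate ((PySem.Str.split? s sepStr).getD [])).foldl
        (fun acc p =>
          if p.1 == 4 then
            acc ++ ["[" ++ ((PySem.List.pop? ((PySem.Str.split? p.2 "/").getD []) 0).map Prod.fst).getD "" ++ "]"]
          else acc ++ [p.2]) [])
      = String.ofList (pvJoin (pvBracketAt 4 (pvSplitRec d s.toList))) := by
  have hsplit : (PySem.Str.split? s sepStr).getD [] =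
      (pvSplitRec d s.toList).map String.ofList := by
    simp [PySem.Str.split?, PySem.Chars.split?, hsep, pv_splitOn_eq]
  simp only [hsplit]
  simp only [pv_head_eq]
  rw [pv_loop_eq (fun t => "[" ++ ((PySem.List.pyGet? ((PySem.Str.split? t "/").getD []) 0).getD "") ++ "]")]
  set ps := pvSplitRec d s.toList with hps
  have hlen : (ps.map String.ofList).length = ps.length := by simp
  by_cases h4 : 4 < ps.length
  · rw [if_pos (by simpa [hlen] using h4)]
    have hget : PySem.List.pyGet? (ps.map String.ofList) (4 : Int)
        = some (String.ofList (ps[4]?.getD [])) := by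
      have h := PySem.List.pyGet?_natCast (ps.map String.ofList) 4
      norm_num at h
      rw [h, List.getElem?_eq_getElem h4]
      simp
    rw [hget]
    simp only [Option.getD_some]
    have hbr : ("[" ++ ((PySem.List.pyGet? ((PySem.Str.split? (String.ofList (ps[4]?.getD [])) "/").getD []) 0).getD "") ++ "]")
        = String.ofList (pvBrack (ps[4]?.getD [])) := by
      have hsl : (PySem.Str.split? (String.ofList (ps[4]?.getD [])) "/").getD []
          = (pvSplitRec '/' (ps[4]?.getD [])).map String.ofList := by
        simp [PySem.Str.split?, PySem.Chars.split?, pv_splitOn_eq]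
      rw [hsl, pvSplitRec_eq '/' (ps[4]?.getD [])]
      simp only [List.map_cons, PySem.List.pyGet?_zero_cons, Option.getD_some]
      apply String.ext
      simp [pvBrack, pvSplitRec_headD, String.toList_append, String.toList_ofList,
        show ("[" : String).toList = ['['] from by decide,
        show ("]" : String).toList = [']'] from by decide]
    rw [hbr, ← List.map_set]
    have hset : pvBracketAt 4 ps = ps.set 4 (pvBrack (ps[4]?.getD [])) := by
      simp [pvBracketAt, h4]
    rw [hset]
    apply String.ext
    simp [PySem.Str.join, pvJoin_eq_join, Function.comp_def, String.toList_ofList,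
      show (";" : String).toList = [';'] from by decide, List.map_map]
  · rw [if_neg (by simpa [hlen] using h4)]
    have hset : pvBracketAt 4 ps = ps := by simp [pvBracketAt, h4]
    rw [hset]
    apply String.ext
    simp [PySem.Str.join, pvJoin_eq_join, Function.comp_def, String.toList_ofList,
      show (";" : String).toList = [';'] from by decide, List.map_map]

-- ---- B-side reduction ----

def pvFinish (st : List Char × Int × Bool) : List Char :=
  if st.2.1 == 4 then st.1 ++ [']'] else st.1

-- after field 4 is closed, every char is copied (separators become ';')
theorem pv_B_high (d : Char) (cs : List Char) :
    ∀ (out : List Char) (f : Int), 5 ≤ f →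
    cs.foldl (pvBStep d) (out, f, false) = (out ++ pvMapRepl d cs, f + (cs.count d : Int), false) := by
  induction cs with
  | nil => intro out f _; simp [pvMapRepl]
  | cons c cs ih =>
    intro out f hf
    have hf4 : (f == 4) = false := by simp; omega
    by_cases h : c = d
    · have hf14 : (f + 1 == 4) = false := by simp; omega
      have hstep : pvBStep d (out, f, false) c = (out ++ [';'], f + 1, false) := by
        simp [pvBStep, h, hf4, hf14]
      rw [List.foldl_cons, hstep, ih _ (f + 1) (by omega)]
      have h1 : pvMapRepl d (c :: cs) = ';' :: pvMapRepl d cs := by simp [pvMapRepl, h]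
      have h2 : ((c :: cs).count d : Int) = (cs.count d : Int) + 1 := by
        simp [h]
      rw [h1, h2]
      simp only [Prod.mk.injEq]
      refine ⟨by simp, by omega, by trivial⟩
    · have hc : (c == d) = false := by simp [h]
      have h1 : pvMapRepl d (c :: cs) = c :: pvMapRepl d cs := by simp [pvMapRepl, h]
      have h2 : ((c :: cs).count d : Int) = (cs.count d : Int) := by
        simp [h]
      have hstep : pvBStep d (out, f, false) c = (out ++ [c], f, false) := by
        simp [pvBStep, hc, hf4]
      rw [List.foldl_cons, hstep, ih (out ++ [c]) f hf, h1, h2]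
      simp

-- inside field 4
theorem pv_B_four (d : Char) (cs : List Char) :
    ∀ (out : List Char) (sk : Bool),
    pvFinish (cs.foldl (pvBStep d) (out, 4, sk)) =
      out ++ (if sk then pvSkip d cs else pvSl d cs) := by
  induction cs with
  | nil => intro out sk; cases sk <;> simp [pvFinish, pvSkip, pvSl]
  | cons c cs ih =>
    intro out sk
    by_cases h : c = d
    · have hstep : pvBStep d (out, (4 : Int), sk) c = (out ++ [']'] ++ [';'], 5, false) := by
        norm_num [pvBStep, h]
      rw [List.foldl_cons, hstep, pv_B_high d cs _ 5 (by norm_num)]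
      have h45 : ((5 : Int) + (cs.count d : Int) == 4) = false := by simp; omega
      have hsk : pvSkip d (c :: cs) = ']' :: ';' :: pvMapRepl d cs := by simp [pvSkip, h]
      have hsl : pvSl d (c :: cs) = ']' :: ';' :: pvMapRepl d cs := by simp [pvSl, h]
      cases sk <;> simp [pvFinish, h45, hsk, hsl]
    · have hc : (c == d) = false := by simp [h]
      by_cases hs : c = '/'
      · have hd : ¬ ('/' : Char) = d := hs ▸ h
        have hstep : pvBStep d (out, (4 : Int), sk) c = (out, 4, true) := by
          simp [pvBStep, hs, hd]
        rw [List.foldl_cons, hstep, ih out true]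
        have hsk : pvSkip d (c :: cs) = pvSkip d cs := by simp [pvSkip, hs, hd]
        have hsl : pvSl d (c :: cs) = pvSkip d cs := by simp [pvSl, hs, hd]
        cases sk <;> simp [hsk, hsl]
      · have hcs : (c == '/') = false := by simp [hs]
        cases sk with
        | false =>
          have hstep : pvBStep d (out, (4 : Int), false) c = (out ++ [c], 4, false) := by
            simp [pvBStep, hc, hcs]
          rw [List.foldl_cons, hstep, ih (out ++ [c]) false]
          simp [pvSl, h, hs]
        | true =>
          have hstep : pvBStep d (out, (4 : Int), true) c = (out, 4, true) := by
            simp [pvBStep, hc, hcs]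
          rw [List.foldl_cons, hstep, ih out true]
          simp [pvSkip, h]

-- before field 4: k + 1 separators still to go
theorem pv_B_low (d : Char) (cs : List Char) :
    ∀ (k : Nat) (out : List Char), k < 4 →
    pvFinish (cs.foldl (pvBStep d) (out, ((3 - k : Nat) : Int), false)) =
      out ++ pvSpecB d (k + 1) cs := by
  induction cs with
  | nil =>
    intro k out hk
    have h4 : (((3 - k : Nat) : Int) == 4) = false := by simp; omega
    simp [pvFinish, h4, pvSpecB]
  | cons c cs ih =>
    intro k out hk
    have h4 : (((3 - k : Nat) : Int) == 4) = false := by simp; omega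
    by_cases h : c = d
    · have hspec : pvSpecB d (k + 1) (c :: cs) = ';' :: pvSpecB d k cs := by
        simp [pvSpecB, h]
      cases k with
      | zero =>
        have hstep : pvBStep d (out, ((3 - 0 : Nat) : Int), false) c
            = (out ++ [';'] ++ ['['], 4, false) := by
          norm_num [pvBStep, h]
        rw [List.foldl_cons, hstep, pv_B_four d cs _ false]
        simp only [hspec]
        simp [pvSpecB]
      | succ j =>
        have harith : ((3 - (j + 1) : Nat) : Int) + 1 = ((3 - j : Nat) : Int) := by omega
        have hstep : pvBStep d (out, ((3 - (j + 1) : Nat) : Int), false) c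
            = (out ++ [';'], ((3 - j : Nat) : Int), false) := by
          have hbeq : (c == d) = true := by simp [h]
          have hb2 : ((((3 - (j + 1) : Nat) : Int)) + 1 == 4) = false := by simp; omega
          simp only [pvBStep, hbeq, if_true, h4, Bool.false_eq_true, if_false, hb2]
          rw [harith]
        rw [List.foldl_cons, hstep, ih j _ (by omega)]
        simp [hspec]
    · have hc : (c == d) = false := by simp [h]
      have hstep : pvBStep d (out, ((3 - k : Nat) : Int), false) c
          = (out ++ [c], ((3 - k : Nat) : Int), false) := by
        simp [pvBStep, hc, h4]
      rw [List.foldl_cons, hstep, ih k _ hk]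
      simp [pvSpecB, h]

theorem pv_B_char (d : Char) (cs : List Char) :
    pvFinish (cs.foldl (pvBStep d) ([], 0, false)) = pvSpecB d 4 cs := by
  have h := pv_B_low d cs 3 [] (by omega)
  norm_num at h
  simpa using h

-- ===== VERDICT (by name: the statement is the Claim_ definition above) =====
theorem change_string_spec : Claim_equal_change_string := by
  intro my_str _
  unfold Spec_change_string change_string change_string_alt
  by_cases h : PySem.Str.find my_str "," > 0
  · simp only [h, if_true]
    rw [pv_A_char ',' "," (by decide) my_str, pv_bracket_spec]
    have hb := pv_B_char ',' my_str.toList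
    unfold pvFinish at hb
    rw [← hb]
  · simp only [h, if_false]
    rw [pv_A_char ';' ";" (by decide) my_str, pv_bracket_spec]
    have hb := pv_B_char ';' my_str.toList
    unfold pvFinish at hb
    rw [← hb]
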